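-- pv_equiv track=rewrite | github.com/octaltree/playbooks | coorie/roles/vim/files/filetype.py | filter_blocks
-- ===== SOURCE A (Python) =====
-- def filter_blocks(blocks, block_signatures, exclusion):
--     notfound = [True for _ in exclusion]
--     filtered = []
--     for (b, ss) in zip(blocks, block_signatures):
--         exclude = False
--         for s in ss:
--             for i, e in enumerate(exclusion):
--                 if s == e:
--                     exclude = True
--                     notfound[i] = False
--                     break
--         if not exclude:
--             filtered.append(b)
--     return filtered, [e for (e, nf) in zip(exclusion, notfound) if nf]
-- ===== SOURCE B (Python) =====
-- def filter_blocks(blocks, block_signatures, exclusion):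
--     pairs = list(zip(blocks, block_signatures))
--     present = {s for _, ss in pairs for s in ss}
--     excl = set(exclusion)
--     filtered = [b for b, ss in pairs if excl.isdisjoint(ss)]
--     unmatched = list(exclusion)
--     for e in present:
--         if e in unmatched:
--             unmatched.remove(e)
--     return filtered, unmatched
-- ===== Notes on version B (the rewrite author's own statement) =====
-- stated objective: faster
-- what changed: Replaces A's triple-nested scans with mutable notfound bookkeeping by set-based passes: build the signature set and exclusion set once, keep the blocks whose signatures are disjoint from the exclusion set, and compute the unmatched list by copying the exclusion list and remove()-ing each found signature value once.
import Mathlib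
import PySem

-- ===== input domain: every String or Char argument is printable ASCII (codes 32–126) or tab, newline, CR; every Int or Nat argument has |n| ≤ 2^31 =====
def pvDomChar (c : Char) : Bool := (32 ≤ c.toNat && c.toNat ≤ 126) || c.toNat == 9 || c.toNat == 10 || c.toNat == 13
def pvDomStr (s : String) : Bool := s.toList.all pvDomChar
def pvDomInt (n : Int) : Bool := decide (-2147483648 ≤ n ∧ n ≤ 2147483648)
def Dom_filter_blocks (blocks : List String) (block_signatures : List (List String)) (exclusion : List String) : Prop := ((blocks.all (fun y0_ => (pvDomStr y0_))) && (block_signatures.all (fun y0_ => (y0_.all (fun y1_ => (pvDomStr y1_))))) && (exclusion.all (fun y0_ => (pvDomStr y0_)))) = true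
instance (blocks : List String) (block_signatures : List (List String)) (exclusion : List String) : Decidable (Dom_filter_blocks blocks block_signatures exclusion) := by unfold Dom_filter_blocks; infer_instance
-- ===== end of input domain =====

-- B replaces A's triple-nested scans with set-based passes: filter the blocks against an
-- exclusion set, then remove each signature value once from a copy of the exclusion list.

-- ===== PORT A =====
-- inner 'for i, e in enumerate(exclusion): if s == e: … ; break' — returns (matched, updated notfound)
def fbMark (s : String) : List String → List Bool → Bool × List Bool
  | e :: es, n :: ns =>
    if s = e then (true, false :: ns)
    else
      let r := fbMark s es ns
      (r.1, n :: r.2)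
  | _, ns => (false, ns)

-- one step of 'for s in ss'
def fbSigStep (exclusion : List String) (st : Bool × List Bool) (s : String) : Bool × List Bool :=
  let r := fbMark s exclusion st.2
  (st.1 || r.1, r.2)

def filter_blocks (blocks : List String) (block_signatures : List (List String)) (exclusion : List String) : List String × List String :=
  let notfound := exclusion.map (fun _ => true)
  let st := (blocks.zip block_signatures).foldl
    (fun (st : List Bool × List String) p =>
      let r := p.2.foldl (fbSigStep exclusion) (false, st.1)
      (r.2, if !r.1 then st.2 ++ [p.1] else st.2))
    (notfound, ([] : List String))
  (st.2, ((exclusion.zip st.1).filter (fun q => q.2)).map (fun q => q.1))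

-- ===== PORT B =====
def filter_blocks_alt (blocks : List String) (block_signatures : List (List String)) (exclusion : List String) : List String × List String :=
  let pairs := blocks.zip block_signatures
  let present : PySem.Set String := PySem.Set.ofList (pairs.flatMap (fun p => p.2))
  let excl : PySem.Set String := PySem.Set.ofList exclusion
  let filtered := (pairs.filter (fun p => PySem.Set.isdisjoint excl p.2)).map (fun p => p.1)
  -- 'unmatched = list(exclusion); for e in present: if e in unmatched: unmatched.remove(e)'
  let unmatched := present.foldl
    (fun (l : List String) e =>
      if l.contains e then
        match PySem.List.remove? l e with
        | some l' => l'
        | none => l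
      else l)
    exclusion
  (filtered, unmatched)

-- ===== PRECONDITION & SPEC =====
def Spec_filter_blocks (blocks : List String) (block_signatures : List (List String)) (exclusion : List String) (out : List String × List String) : Prop := out = filter_blocks_alt blocks block_signatures exclusion
instance (blocks : List String) (block_signatures : List (List String)) (exclusion : List String) (out : List String × List String) : Decidable (Spec_filter_blocks blocks block_signatures exclusion out) := by unfold Spec_filter_blocks; infer_instance

-- ===== CLAIM (what is proved, stated in full; the proofs are below) =====
def Claim_equal_filter_blocks : Prop := ∀ (blocks : List String) (block_signatures : List (List String)) (exclusion : List String), Dom_filter_blocks blocks block_signatures exclusion → Spec_filter_blocks blocks block_signatures exclusion (filter_blocks blocks block_signatures exclusion)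

-- ===== LEMMAS AND PROOFS =====

-- reference value of A's 'notfound' list after the signatures 'ts' have been processed,
-- with 'pre' the exclusion entries preceding the current suffix
def mask (ts : List String) : List String → List String → List Bool
  | _, [] => []
  | pre, e :: es => (!(ts.contains e) || pre.contains e) :: mask ts (pre ++ [e]) es

theorem mask_nil_ts (es : List String) : ∀ pre, mask [] pre es = es.map (fun _ => true) := by
  induction es with
  | nil => intro pre; rfl
  | cons e es ih => intro pre; simp [mask, ih]

theorem mask_mem (ts : List String) (s : String) (es : List String) :
    ∀ pre, s ∈ pre → mask (ts ++ [s]) pre es = mask ts pre es := by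
  induction es with
  | nil => intro pre _; rfl
  | cons e es ih =>
    intro pre hs
    simp only [mask, ih (pre ++ [e]) (by simp [hs])]
    congr 1
    by_cases he : e = s
    · subst he; simp [List.contains_eq_mem, hs]
    · simp [List.contains_eq_mem, he]

theorem fbMark_mask (ts : List String) (s : String) (es : List String) :
    ∀ pre, s ∉ pre →
      fbMark s es (mask ts pre es) = (es.contains s, mask (ts ++ [s]) pre es) := by
  induction es with
  | nil => intro pre _; rfl
  | cons e es ih =>
    intro pre hs
    by_cases he : s = e
    · subst he
      have hm := mask_mem ts s es (pre ++ [s]) (by simp)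
      simp [mask, fbMark, hm, List.contains_eq_mem, hs]
    · have he' : ¬e = s := fun h => he h.symm
      have hs' : s ∉ pre ++ [e] := by
        intro h
        rcases List.mem_append.1 h with h | h
        · exact hs h
        · simp at h; exact he h
      simp only [mask, fbMark, if_neg he]
      rw [ih (pre ++ [e]) hs']
      simp [List.contains_eq_mem, he, he']

theorem fbSigs_mask (exclusion : List String) (ss : List String) :
    ∀ (ts : List String) (b : Bool),
      ss.foldl (fbSigStep exclusion) (b, mask ts [] exclusion)
        = (b || ss.any (fun s => exclusion.contains s), mask (ts ++ ss) [] exclusion) := by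
  induction ss with
  | nil => intro ts b; simp
  | cons s ss ih =>
    intro ts b
    simp only [List.foldl_cons, fbSigStep,
      fbMark_mask ts s exclusion [] (by simp)]
    rw [ih (ts ++ [s])]
    simp [List.any_cons, Bool.or_assoc]

theorem outer_mask (exclusion : List String) (pairs : List (String × List String)) :
    ∀ (ts : List String) (acc : List String),
      pairs.foldl
        (fun (st : List Bool × List String) p =>
          let r := p.2.foldl (fbSigStep exclusion) (false, st.1)
          (r.2, if !r.1 then st.2 ++ [p.1] else st.2))
        (mask ts [] exclusion, acc)
      = (mask (ts ++ pairs.flatMap (fun p => p.2)) [] exclusion,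
         acc ++ (pairs.filter (fun p => !(p.2.any (fun s => exclusion.contains s)))).map (fun p => p.1)) := by
  induction pairs with
  | nil => intro ts acc; simp
  | cons p ps ih =>
    intro ts acc
    simp only [List.foldl_cons, fbSigs_mask exclusion p.2 ts false, Bool.false_or]
    rw [ih (ts ++ p.2)]
    cases h : (p.2.any fun s => exclusion.contains s) with
    | false =>
      have hb : (!(p.2.any fun s => exclusion.contains s)) = true := by rw [h]; rfl
      rw [List.filter_cons, if_pos hb]
      simp [List.append_assoc]
    | true =>
      have h' : ¬∀ x ∈ p.2, x ∉ exclusion := by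
        simp only [List.any_eq_true, List.contains_eq_mem, decide_eq_true_eq] at h
        obtain ⟨x, hx, he⟩ := h
        exact fun hall => hall x hx he
      simp [h']

-- B's loop body ('if e in unmatched: unmatched.remove(e)') is List.erase
theorem step_eq_erase (l : List String) (e : String) :
    (if l.contains e then
        match PySem.List.remove? l e with
        | some l' => l'
        | none => l
      else l) = l.erase e := by
  by_cases h : e ∈ l
  · rw [PySem.List.remove?_eq_some_erase l e h]
    simp [List.contains_eq_mem, h]
  · have h2 : l.erase e = l := List.erase_of_not_mem h
    simp [List.contains_eq_mem, h, h2]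

theorem foldl_erase_nil (D : List String) :
    D.foldl (fun (l : List String) v => l.erase v) [] = [] := by
  induction D with
  | nil => rfl
  | cons v D ih => simpa using ih

-- pushing one kept/erased element through the erase fold
theorem foldl_erase_cons (D : List String) (e : String) (es : List String) :
    D.foldl (fun (l : List String) v => l.erase v) (e :: es)
      = if e ∈ D then (D.erase e).foldl (fun (l : List String) v => l.erase v) es
        else e :: D.foldl (fun (l : List String) v => l.erase v) es := by
  induction D generalizing es with
  | nil => simp
  | cons v D ih =>
    by_cases hv : v = e
    · subst hv
      simp [List.erase_cons_head]
    · have hev : ¬e = v := fun h => hv h.symm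
      have h1 : (e :: es).erase v = e :: es.erase v := by
        rw [List.erase_cons, if_neg (by simp [hev])]
      simp only [List.foldl_cons, h1, ih (es.erase v)]
      by_cases he : e ∈ D
      · rw [if_pos he, if_pos (List.mem_cons_of_mem v he), List.erase_cons,
          if_neg (by simp [hv])]
        simp
      · have hvd : e ∉ v :: D := by
          intro h
          rcases List.mem_cons.1 h with h | h
          · exact hv h.symm
          · exact he h
        rw [if_neg he, if_neg hvd]

-- A's zip-with-mask filter = erasing each flat value once, for any duplicate-free enumeration D
-- of the flat values not yet seen
theorem maskFilter_eq_foldl_erase (flat : List String) (es : List String) :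
    ∀ (pre : List String) (D : List String), D.Nodup →
      (∀ x, x ∈ D ↔ x ∈ flat ∧ x ∉ pre) →
      ((es.zip (mask flat pre es)).filter (fun q => q.2)).map (fun q => q.1)
        = D.foldl (fun (l : List String) v => l.erase v) es := by
  induction es with
  | nil => intro pre D _ _; simp [foldl_erase_nil]
  | cons e es ih =>
    intro pre D hnd hmem
    rw [foldl_erase_cons D e es]
    simp only [mask, List.zip_cons_cons, List.filter_cons]
    by_cases hD : e ∈ D
    · obtain ⟨hef, hep⟩ := (hmem e).1 hD
      have hentry : (!flat.contains e || pre.contains e) = false := by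
        simp [List.contains_eq_mem, hef, hep]
      rw [if_pos hD, hentry]
      simp only [Bool.false_eq_true, if_false]
      apply ih (pre ++ [e]) (D.erase e) (hnd.erase e)
      intro x
      rw [hnd.mem_erase_iff, hmem x]
      constructor
      · rintro ⟨hne, hf, hp⟩
        refine ⟨hf, ?_⟩
        intro h
        rcases List.mem_append.1 h with h | h
        · exact hp h
        · simp at h; exact hne h
      · rintro ⟨hf, hp⟩
        exact ⟨fun h => hp (by simp [h]), hf, fun h => hp (by simp [h])⟩
    · have hentry : (!flat.contains e || pre.contains e) = true := by
        have := fun h => hD ((hmem e).2 h)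
        by_cases hf : e ∈ flat
        · have hp : e ∈ pre := by
            by_contra hp
            exact this ⟨hf, hp⟩
          simp [List.contains_eq_mem, hp]
        · simp [List.contains_eq_mem, hf]
      rw [if_neg hD, hentry]
      have hrec := ih (pre ++ [e]) D hnd (by
        intro x
        rw [hmem x]
        constructor
        · rintro ⟨hf, hp⟩
          refine ⟨hf, ?_⟩
          intro h
          rcases List.mem_append.1 h with h | h
          · exact hp h
          · simp at h
            subst h
            exact hD ((hmem x).2 ⟨hf, hp⟩)
        · rintro ⟨hf, hp⟩
          exact ⟨hf, fun h => hp (by simp [h])⟩)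
      simp [hrec]

-- A in closed form: filtered blocks, and the exclusions zipped with the mask
theorem filter_blocks_eq (blocks : List String) (bss : List (List String)) (exclusion : List String) :
    filter_blocks blocks bss exclusion
      = (((blocks.zip bss).filter (fun p => !(p.2.any (fun s => exclusion.contains s)))).map (fun p => p.1),
         ((exclusion.zip (mask ((blocks.zip bss).flatMap (fun p => p.2)) [] exclusion)).filter (fun q => q.2)).map (fun q => q.1)) := by
  unfold filter_blocks
  dsimp only
  rw [show exclusion.map (fun _ => true) = mask [] [] exclusion from (mask_nil_ts exclusion []).symm,
    outer_mask exclusion (blocks.zip bss) [] []]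
  simp

-- ===== VERDICT (by name: the statement is the Claim_ definition above) =====
theorem filter_blocks_spec : Claim_equal_filter_blocks := by
  intro blocks bss exclusion _
  unfold Spec_filter_blocks
  rw [filter_blocks_eq]
  unfold filter_blocks_alt
  dsimp only
  rw [Prod.mk.injEq]
  constructor
  · congr 1
    apply List.filter_congr
    intro p _
    rw [Bool.eq_iff_iff]
    simp only [Bool.not_eq_eq_eq_not, Bool.not_true, List.any_eq_false,
      PySem.Set.isdisjoint_iff, PySem.Set.mem_ofList, List.contains_eq_mem,
      decide_eq_true_eq]
    tauto
  · rw [show (fun (l : List String) e =>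
        if l.contains e then
          match PySem.List.remove? l e with
          | some l' => l'
          | none => l
        else l) = (fun (l : List String) v => l.erase v) from funext fun l => funext fun e => step_eq_erase l e]
    apply maskFilter_eq_foldl_erase _ exclusion []
    · exact PySem.Set.nodup_ofList _
    · intro x
      simp [PySem.Set.mem_ofList]
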